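-- pv_equiv track=rewrite | github.com/JesseAnak7534/Jesse-Anak-Portfolio | tools/extract_resume.py | chunk_entries
-- ===== SOURCE A (Python) =====
-- BULLET_PREFIXES = ("•", "- ", "– ", "— ", "* ")
--
-- def chunk_entries(lines):
--     # Split by blank lines or strong bullet markers
--     entries = []
--     buf = []
--     for l in lines:
--         if not l.strip():
--             if buf:
--                 entries.append(buf)
--                 buf = []
--             continue
--         if l.strip().startswith(BULLET_PREFIXES) and buf:
--             # treat as continuation bullet
--             buf.append(l)
--         else:
--             buf.append(l)
--     if buf:
--         entries.append(buf)
--     return entries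
-- ===== SOURCE B (Python) =====
-- def chunk_entries(lines):
--     # Index-then-slice: first locate the blank lines, then slice out the
--     # non-empty segments between consecutive cut positions.
--     blanks = [i for i, l in enumerate(lines) if not l.strip()]
--     cuts = [-1] + blanks + [len(lines)]
--     return [lines[a + 1:b] for a, b in zip(cuts, cuts[1:]) if b - a > 1]
-- ===== Notes on version B (the rewrite author's own statement) =====
-- stated objective: alternative
-- what changed: Replaces A's single-pass buffer-flush loop (with its dead bullet-continuation branch) by a staged index-then-slice decomposition: first compute the blank-line indices, then slice the non-empty segments between consecutive cut positions.
import Mathlib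
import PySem

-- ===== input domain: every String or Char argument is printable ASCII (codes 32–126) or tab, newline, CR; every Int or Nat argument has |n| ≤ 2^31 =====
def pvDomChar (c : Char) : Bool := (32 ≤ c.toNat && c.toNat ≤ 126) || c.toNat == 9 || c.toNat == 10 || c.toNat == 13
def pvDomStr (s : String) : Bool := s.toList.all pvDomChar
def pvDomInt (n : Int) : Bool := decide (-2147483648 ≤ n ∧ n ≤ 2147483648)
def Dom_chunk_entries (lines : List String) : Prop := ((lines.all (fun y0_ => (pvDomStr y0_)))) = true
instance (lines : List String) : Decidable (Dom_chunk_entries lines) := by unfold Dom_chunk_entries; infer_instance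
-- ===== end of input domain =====

-- B replaces A's buffer-flush loop by an index-then-slice decomposition (blank indices, then segment slices); same return value, no speed claim.

-- ===== PORT A =====
-- BULLET_PREFIXES = ("•", "- ", "– ", "— ", "* ")
def BULLET_PREFIXES : List String := ["•", "- ", "– ", "— ", "* "]

-- the for-loop of A, state = (entries, buf), processed left to right
def chunkA_go (entries : List (List String)) (buf : List String) :
    List String → List (List String)
  | [] => if buf ≠ [] then entries ++ [buf] else entries
  | l :: rest =>
    if (PySem.Str.strip l) = "" then
      if buf ≠ [] then chunkA_go (entries ++ [buf]) [] rest
      else chunkA_go entries [] rest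
    else
      if BULLET_PREFIXES.any (fun p => PySem.Str.startswith (PySem.Str.strip l) p) ∧ buf ≠ []
      then chunkA_go entries (buf ++ [l]) rest   -- continuation bullet: buf.append(l)
      else chunkA_go entries (buf ++ [l]) rest   -- buf.append(l)

def chunk_entries (lines : List String) : List (List String) :=
  chunkA_go [] [] lines

-- ===== PORT B =====
-- blanks = [i for i, l in enumerate(lines) if not l.strip()]
def pvBlanks (lines : List String) : List Int :=
  (PySem.List.enumerate lines).filterMap
    (fun il => if (PySem.Str.strip il.2) = "" then some il.1 else none)

-- cuts = [-1] + blanks + [len(lines)]; [lines[a+1:b] for a, b in zip(cuts, cuts[1:]) if b - a > 1]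
def chunk_entries_alt (lines : List String) : List (List String) :=
  let cuts : List Int := [-1] ++ pvBlanks lines ++ [(lines.length : Int)]
  (cuts.zip cuts.tail).filterMap
    (fun ab => if ab.2 - ab.1 > 1 then some (PySem.List.slice lines (some (ab.1 + 1)) (some ab.2)) else none)

-- ===== PRECONDITION & SPEC =====
def Spec_chunk_entries (lines : List String) (out : List (List String)) : Prop := out = chunk_entries_alt lines
instance (lines : List String) (out : List (List String)) : Decidable (Spec_chunk_entries lines out) := by unfold Spec_chunk_entries; infer_instance

-- ===== CLAIM (what is proved, stated in full; the proofs are below) =====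
def Claim_equal_chunk_entries : Prop := ∀ (lines : List String), Dom_chunk_entries lines → Spec_chunk_entries lines (chunk_entries lines)

-- ===== LEMMAS AND PROOFS =====

-- reference recursion: chunk a line list into its maximal non-blank runs
def chunkRec : List String → List (List String)
  | [] => []
  | x :: xs =>
    if (PySem.Str.strip x) = "" then chunkRec xs
    else
      match xs with
      | [] => [[x]]
      | y :: _ =>
        if (PySem.Str.strip y) = "" then [x] :: chunkRec xs
        else
          match chunkRec xs with
          | [] => [[x]]               -- unreachable when y is non-blank
          | g :: gs => (x :: g) :: gs

def prependFirst (buf : List String) : List (List String) → List (List String)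
  | [] => [buf]
  | g :: gs => (buf ++ g) :: gs

-- what the A-loop yields from state ([], buf) on the remaining lines
def chunkBuf (buf : List String) (lines : List String) : List (List String) :=
  match buf, lines with
  | [], _ => chunkRec lines
  | buf, [] => [buf]
  | buf, x :: xs =>
    if (PySem.Str.strip x) = "" then buf :: chunkRec xs
    else prependFirst buf (chunkRec (x :: xs))

-- unfolding equations for chunkRec, kept folded elsewhere
lemma chunkRec_blank (x : String) (xs : List String) (hx : (PySem.Str.strip x) = "") :
    chunkRec (x :: xs) = chunkRec xs := by
  cases xs <;> simp [chunkRec, hx]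

lemma chunkRec_single (x : String) (hx : ¬ (PySem.Str.strip x) = "") :
    chunkRec [x] = [[x]] := by
  simp [chunkRec, hx]

lemma chunkRec_nb (x y : String) (ys : List String) (hx : ¬ (PySem.Str.strip x) = "")
    (hy : (PySem.Str.strip y) = "") :
    chunkRec (x :: y :: ys) = [x] :: chunkRec (y :: ys) := by
  simp [chunkRec, hx, hy]

lemma chunkRec_nn (x y : String) (ys : List String) (hx : ¬ (PySem.Str.strip x) = "")
    (hy : ¬ (PySem.Str.strip y) = "") :
    chunkRec (x :: y :: ys) =
      match chunkRec (y :: ys) with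
      | [] => [[x]]
      | g :: gs => (x :: g) :: gs := by
  simp [chunkRec, hx, hy]

lemma chunkA_go_entries (rest : List String) :
    ∀ entries buf, chunkA_go entries buf rest = entries ++ chunkA_go [] buf rest := by
  induction rest with
  | nil => intro entries buf; simp only [chunkA_go]; split <;> simp
  | cons l rest ih =>
    intro entries buf
    simp only [chunkA_go]
    by_cases hl : (PySem.Str.strip l) = ""
    · rw [if_pos hl, if_pos hl]
      by_cases hb : buf ≠ []
      · rw [if_pos hb, if_pos hb, ih (entries ++ [buf]), ih ([] ++ [buf])]
        simp
      · rw [if_neg hb, if_neg hb]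
        exact ih _ _
    · rw [if_neg hl, if_neg hl, ite_self, ite_self]
      exact ih _ _

-- pushing one more non-blank line into the buffer
lemma chunkBuf_snoc (x : String) (xs : List String) (hx : ¬ (PySem.Str.strip x) = "") :
    ∀ buf, chunkBuf (buf ++ [x]) xs = chunkBuf buf (x :: xs) := by
  intro buf
  cases buf with
  | nil =>
    simp only [List.nil_append]
    cases xs with
    | nil => simp [chunkBuf, chunkRec_single x hx]
    | cons y ys =>
      by_cases hy : (PySem.Str.strip y) = ""
      · simp [chunkBuf, hx, hy, chunkRec_nb x y ys hx hy, chunkRec_blank y ys hy]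
      · rw [show chunkBuf [x] (y :: ys) = prependFirst [x] (chunkRec (y :: ys)) from by
            simp [chunkBuf, hy],
          show chunkBuf [] (x :: y :: ys) = chunkRec (x :: y :: ys) from by simp [chunkBuf],
          chunkRec_nn x y ys hx hy]
        cases hr : chunkRec (y :: ys) <;> simp [prependFirst, hr]
  | cons b bs =>
    cases xs with
    | nil => simp [chunkBuf, hx, chunkRec_single x hx, prependFirst]
    | cons y ys =>
      by_cases hy : (PySem.Str.strip y) = ""
      · simp [chunkBuf, hx, hy, chunkRec_nb x y ys hx hy, chunkRec_blank y ys hy, prependFirst]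
      · rw [show chunkBuf ((b :: bs) ++ [x]) (y :: ys)
              = prependFirst ((b :: bs) ++ [x]) (chunkRec (y :: ys)) from by simp [chunkBuf, hy],
          show chunkBuf (b :: bs) (x :: y :: ys)
              = prependFirst (b :: bs) (chunkRec (x :: y :: ys)) from by simp [chunkBuf, hx],
          chunkRec_nn x y ys hx hy]
        cases hr : chunkRec (y :: ys) <;> simp [prependFirst, hr]

lemma chunkA_go_eq_chunkBuf (lines : List String) :
    ∀ buf, chunkA_go [] buf lines = chunkBuf buf lines := by
  induction lines with
  | nil =>
    intro buf
    cases buf <;> simp [chunkA_go, chunkBuf, chunkRec]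
  | cons x xs ih =>
    intro buf
    by_cases hx : (PySem.Str.strip x) = ""
    · cases buf with
      | nil =>
        rw [show chunkA_go [] [] (x :: xs) = chunkA_go [] [] xs by simp [chunkA_go, hx]]
        rw [ih []]
        show chunkRec xs = chunkBuf [] (x :: xs)
        rw [show chunkBuf [] (x :: xs) = chunkRec (x :: xs) from rfl, chunkRec_blank x xs hx]
      | cons b bs =>
        rw [show chunkA_go [] (b :: bs) (x :: xs) = chunkA_go [b :: bs] [] xs by
          simp [chunkA_go, hx]]
        rw [chunkA_go_entries, ih []]
        simp [chunkBuf, hx]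
    · rw [show chunkA_go [] buf (x :: xs) = chunkA_go [] (buf ++ [x]) xs by
        simp [chunkA_go, hx]]
      rw [ih (buf ++ [x]), chunkBuf_snoc x xs hx buf]

lemma chunkA_eq_chunkRec (lines : List String) : chunk_entries lines = chunkRec lines := by
  rw [chunk_entries, chunkA_go_eq_chunkBuf]; rfl

-- ---------- B side ----------

-- the segment extraction from a cut list, written as a structural recursion over the cuts
def segF (lines : List String) : List Int → List (List String)
  | a :: b :: rest =>
    (if b - a > 1 then [PySem.List.slice lines (some (a + 1)) (some b)] else [])
      ++ segF lines (b :: rest)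
  | _ => []

lemma filterMap_zip_eq_segF (lines : List String) :
    ∀ cuts : List Int,
      (cuts.zip cuts.tail).filterMap
        (fun ab => if ab.2 - ab.1 > 1 then
            some (PySem.List.slice lines (some (ab.1 + 1)) (some ab.2)) else none)
      = segF lines cuts := by
  intro cuts
  induction cuts with
  | nil => rfl
  | cons a rest ih =>
    cases rest with
    | nil => rfl
    | cons b rest2 =>
      have ih' := ih
      simp only [List.tail_cons] at ih' ⊢
      by_cases h : b - a > 1
      · simp [segF, h, ih']
      · simp [segF, h, ih']

lemma chunkB_eq_segF (lines : List String) :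
    chunk_entries_alt lines
      = segF lines ([-1] ++ pvBlanks lines ++ [(lines.length : Int)]) := by
  rw [chunk_entries_alt]
  exact filterMap_zip_eq_segF lines _

-- slice shift lemmas on cons
lemma slice_cons_shift (x : String) (xs : List String) (p q : Nat) :
    PySem.List.slice (x :: xs) (some ((p : Int) + 1)) (some ((q : Int) + 1))
      = PySem.List.slice xs (some (p : Int)) (some (q : Int)) := by
  have h1 : ((p : Int) + 1) = ((p + 1 : Nat) : Int) := by push_cast; ring
  have h2 : ((q : Int) + 1) = ((q + 1 : Nat) : Int) := by push_cast; ring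
  rw [h1, h2, PySem.List.slice_natCast, PySem.List.slice_natCast]
  simp [Nat.succ_sub_succ]

lemma slice_cons_zero (x : String) (xs : List String) (q : Nat) :
    PySem.List.slice (x :: xs) (some (0 : Int)) (some ((q : Int) + 1))
      = x :: PySem.List.slice xs (some (0 : Int)) (some (q : Int)) := by
  have h0 : (0 : Int) = ((0 : Nat) : Int) := rfl
  have h2 : ((q : Int) + 1) = ((q + 1 : Nat) : Int) := by push_cast; ring
  rw [h0, h2, PySem.List.slice_natCast, PySem.List.slice_natCast]
  simp

-- pushing a new head past a shifted cut list
lemma segF_shift (x : String) (xs : List String) :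
    ∀ cs : List Int, (∀ c ∈ cs, -1 ≤ c) →
      segF (x :: xs) (cs.map (· + 1)) = segF xs cs := by
  intro cs
  induction cs with
  | nil => intro _; rfl
  | cons a rest ih =>
    intro hmem
    cases rest with
    | nil => rfl
    | cons b rest2 =>
      have ha : -1 ≤ a := hmem a (by simp)
      have hb : -1 ≤ b := hmem b (by simp)
      have ihr : segF (x :: xs) ((b :: rest2).map (· + 1)) = segF xs (b :: rest2) :=
        ih (fun c hc => hmem c (List.mem_cons_of_mem _ hc))
      simp only [List.map_cons] at ihr ⊢
      simp only [segF]
      rw [ihr]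
      congr 1
      by_cases h : b - a > 1
      · rw [if_pos h, if_pos (by omega : b + 1 - (a + 1) > 1)]
        obtain ⟨p, hp⟩ : ∃ p : Nat, a + 1 = (p : Int) :=
          ⟨(a + 1).toNat, by omega⟩
        obtain ⟨q, hq⟩ : ∃ q : Nat, b = (q : Int) :=
          ⟨b.toNat, by omega⟩
        rw [show (a + 1 + 1 : Int) = (p : Int) + 1 by omega,
          show (b + 1 : Int) = (q : Int) + 1 by omega,
          slice_cons_shift, ← hp, ← hq]
      · rw [if_neg h, if_neg (by omega : ¬ (b + 1 - (a + 1) > 1))]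

lemma pvBlanks_nonneg (lines : List String) : ∀ c ∈ pvBlanks lines, 0 ≤ c := by
  intro c hc
  rw [pvBlanks] at hc
  obtain ⟨⟨i, l⟩, hmem, hif⟩ := List.mem_filterMap.mp hc
  obtain ⟨k, hk, hp⟩ := (PySem.List.mem_enumerate_iff _ _ _).mp hmem
  by_cases h : (PySem.Str.strip l) = "" <;> simp [h] at hif
  subst hif
  have : i = (0 : Int) + k := congrArg Prod.fst hp
  omega

lemma map_add_add (l : List Int) (u v : Int) :
    (l.map (· + u)).map (· + v) = l.map (· + (u + v)) := by
  rw [List.map_map]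
  congr 1
  funext c
  simp [Function.comp]
  ring

-- the blank-index list starting the enumeration at s is the start-0 list shifted by s
lemma blanksFrom_shift (xs : List String) : ∀ s : Int,
    (PySem.List.enumerate xs s).filterMap
      (fun il => if (PySem.Str.strip il.2) = "" then some il.1 else none)
    = ((PySem.List.enumerate xs 0).filterMap
        (fun il => if (PySem.Str.strip il.2) = "" then some il.1 else none)).map (· + s) := by
  induction xs with
  | nil => intro s; simp [PySem.List.enumerate_nil]
  | cons y ys ih =>
    intro s
    rw [PySem.List.enumerate_cons, PySem.List.enumerate_cons]
    by_cases h : (PySem.Str.strip y) = ""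
    · simp only [List.filterMap_cons, h, if_pos, zero_add, List.map_cons]
      rw [ih (s + 1), ih 1, map_add_add]
      have h1 : (1 : Int) + s = s + 1 := by ring
      rw [h1]
    · simp only [List.filterMap_cons, h, if_neg, ite_false, zero_add]
      rw [ih (s + 1), ih 1, map_add_add]
      have h1 : (1 : Int) + s = s + 1 := by ring
      rw [h1]

-- pvBlanks on a cons
lemma pvBlanks_cons (x : String) (xs : List String) :
    pvBlanks (x :: xs)
      = (if (PySem.Str.strip x) = "" then [(0 : Int)] else [])
        ++ (pvBlanks xs).map (· + 1) := by
  rw [pvBlanks, pvBlanks, PySem.List.enumerate_cons]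
  by_cases h : (PySem.Str.strip x) = ""
  · simp only [List.filterMap_cons, h, if_pos, zero_add, ite_true]
    rw [blanksFrom_shift xs 1]
    simp
  · simp only [List.filterMap_cons, h, if_neg, ite_false, zero_add]
    rw [blanksFrom_shift xs 1]
    simp

lemma cuts_ge (lines : List String) :
    ∀ c ∈ ([-1] ++ pvBlanks lines ++ [(lines.length : Int)]), -1 ≤ c := by
  intro c hc
  simp only [List.cons_append, List.nil_append, List.mem_cons, List.mem_append,
    List.not_mem_nil, or_false] at hc
  rcases hc with rfl | h | rfl
  · omega
  · have := pvBlanks_nonneg lines c h; omega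
  · omega

lemma segF_cons_cons (lines : List String) (a b : Int) (rest : List Int) :
    segF lines (a :: b :: rest)
      = (if b - a > 1 then [PySem.List.slice lines (some (a + 1)) (some b)] else [])
        ++ segF lines (b :: rest) := rfl

lemma slice01 (x : String) (xs : List String) :
    PySem.List.slice (x :: xs) (some (0 : Int)) (some (1 : Int)) = [x] := by
  rw [show (0 : Int) = ((0 : Nat) : Int) by norm_num,
    show (1 : Int) = ((1 : Nat) : Int) by norm_num, PySem.List.slice_natCast]
  rfl

lemma chunkB_eq_chunkRec (lines : List String) : chunk_entries_alt lines = chunkRec lines := by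
  induction lines with
  | nil => rfl
  | cons x xs ih =>
    rw [chunkB_eq_segF] at ih ⊢
    have hz : (-1 : Int) + 1 = 0 := by norm_num
    by_cases hx : (PySem.Str.strip x) = ""
    · -- blank head: the (-1,0) pair is dropped and all other cuts shift by one
      have hcuts : [-1] ++ pvBlanks (x :: xs) ++ [((x :: xs).length : Int)]
          = -1 :: 0 :: ((pvBlanks xs ++ [(xs.length : Int)]).map (· + 1)) := by
        rw [pvBlanks_cons, hx]
        simp only [ite_true, List.cons_append, List.nil_append, List.map_append,
          List.map_cons, List.map_nil, List.length_cons]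
        push_cast
        simp
      rw [hcuts, segF_cons_cons, if_neg (by norm_num), List.nil_append]
      have hm : (0 : Int) :: ((pvBlanks xs ++ [(xs.length : Int)]).map (· + 1))
          = ([-1] ++ pvBlanks xs ++ [(xs.length : Int)]).map (· + 1) := by simp
      rw [hm, segF_shift x xs _ (cuts_ge xs), ih, chunkRec_blank x xs hx]
    · -- non-blank head: the first segment absorbs x, the rest shifts by one
      have hb : pvBlanks (x :: xs) = (pvBlanks xs).map (· + 1) := by
        rw [pvBlanks_cons, if_neg hx]; simp
      have hcuts : [-1] ++ pvBlanks (x :: xs) ++ [((x :: xs).length : Int)]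
          = -1 :: ((pvBlanks xs ++ [(xs.length : Int)]).map (· + 1)) := by
        rw [hb]
        simp only [List.cons_append, List.nil_append, List.map_append,
          List.map_cons, List.map_nil, List.length_cons]
        push_cast
        simp
      have hge : ∀ c ∈ (pvBlanks xs ++ [(xs.length : Int)]), -1 ≤ c := by
        intro c hc
        exact cuts_ge xs c (by
          simp only [List.cons_append, List.nil_append, List.mem_cons]
          exact Or.inr (by simpa using hc))
      have hshift : segF (x :: xs) ((pvBlanks xs ++ [(xs.length : Int)]).map (· + 1))
          = segF xs (pvBlanks xs ++ [(xs.length : Int)]) := segF_shift x xs _ hge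
      cases hxs : xs with
      | nil =>
        subst hxs
        rw [chunkRec_single x hx, hcuts]
        have hpb : pvBlanks ([] : List String) = [] := rfl
        rw [hpb]
        simp only [List.nil_append, List.length_nil, Nat.cast_zero, List.map_cons, List.map_nil]
        rw [segF_cons_cons, if_pos (by norm_num)]
        rw [show ((0 : Int) + 1) = 1 by norm_num, hz, slice01]
        rfl
      | cons y ys =>
        by_cases hy : (PySem.Str.strip y) = ""
        · -- next line blank: first cut is 0, segment is [x]
          have hb2 : pvBlanks xs = 0 :: (pvBlanks ys).map (· + 1) := by
            rw [hxs, pvBlanks_cons, hy]; simp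
          rw [← hxs]
          rw [hcuts, hb2]
          simp only [List.cons_append, List.map_cons]
          rw [segF_cons_cons, if_pos (by norm_num)]
          rw [show ((0 : Int) + 1) = 1 by norm_num, hz, slice01]
          have htail : segF (x :: xs) ((1 : Int) :: ((pvBlanks ys).map (· + 1) ++ [(xs.length : Int)]).map (· + 1))
              = segF xs (pvBlanks xs ++ [(xs.length : Int)]) := by
            rw [← hshift, hb2]
            simp only [List.cons_append, List.map_cons]
            norm_num
          rw [htail]
          rw [hxs, chunkRec_nb x y ys hx hy, ← hxs, ← ih]
          simp only [List.cons_append, List.nil_append]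
          rw [hb2]
          simp only [List.cons_append]
          rw [segF_cons_cons, if_neg (by norm_num), List.nil_append]
        · -- next line non-blank: the first cut is ≥ 1 and the first segment absorbs x
          have hb3 : pvBlanks xs = (pvBlanks ys).map (· + 1) := by
            rw [hxs, pvBlanks_cons, if_neg hy]; simp
          rw [← hxs]
          -- the first cut, written as q + 1 with q : Nat
          obtain ⟨q, ct, hcs⟩ : ∃ (q : Nat) (ct : List Int),
              pvBlanks xs ++ [(xs.length : Int)] = ((q : Int) + 1) :: ct := by
            cases hpb : pvBlanks xs with
            | nil =>
              refine ⟨ys.length, [], ?_⟩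
              rw [hxs]
              simp only [List.nil_append, List.length_cons]
              congr 1
            | cons p ps =>
              have hp1 : 1 ≤ p := by
                have : p ∈ (pvBlanks ys).map (· + 1) := by rw [← hb3, hpb]; simp
                obtain ⟨p0, hp0, rfl⟩ := List.mem_map.mp this
                have := pvBlanks_nonneg ys p0 hp0
                omega
              refine ⟨(p - 1).toNat, ps ++ [(xs.length : Int)], ?_⟩
              simp only [List.cons_append]
              congr 1
              omega
          rw [hcuts, hcs]
          simp only [List.map_cons]
          rw [segF_cons_cons, if_pos (by omega), hz]
          have hsl : PySem.List.slice (x :: xs) (some (0 : Int)) (some ((q : Int) + 1 + 1))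
              = x :: PySem.List.slice xs (some (0 : Int)) (some ((q : Int) + 1)) := by
            rw [show ((q : Int) + 1 + 1) = (((q + 1 : Nat) : Int) + 1) by push_cast; ring,
              slice_cons_zero]
            push_cast
            rfl
          rw [hsl]
          have htail : segF (x :: xs) (((q : Int) + 1 + 1) :: ct.map (· + 1))
              = segF xs (pvBlanks xs ++ [(xs.length : Int)]) := by
            rw [← hshift, hcs]
            simp only [List.map_cons]
          rw [htail]
          rw [hxs, chunkRec_nn x y ys hx hy, ← hxs, ← ih]
          simp only [List.cons_append, List.nil_append]
          rw [hcs, segF_cons_cons, if_pos (by omega : ((q : Int) + 1) - (-1) > 1), hz]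
          simp only [List.singleton_append]
-- ===== VERDICT (by name: the statement is the Claim_ definition above) =====
theorem chunk_entries_spec : Claim_equal_chunk_entries := by
  intro lines _
  unfold Spec_chunk_entries
  rw [chunkA_eq_chunkRec, chunkB_eq_chunkRec]
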